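-- pv_equiv track=rewrite | github.com/ericwangg/cse_coursework | cse2050_python_ood_and_data-structures/Lab/Lab 06_ Implementing SortedList using Python List Starter Code/Starter Code/sortedlist.py | cmpBySum
-- ===== SOURCE A (Python) =====
-- def cmpBySum(i, j):
--     sum1 = 0
--     sum2 = 0
--     while i > 0:
--         d = i%10
--         i = i//10
--         sum1 += d
--     while j > 0:
--         d = j%10
--         j = j//10
--         sum2 += d
--     if sum1 < sum2:
--         return -1
--     elif sum1 == sum2:
--         return 0
--     else:
--         return 1
-- ===== SOURCE B (Python) =====
-- def cmpBySum(i, j):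
--     def digit_sum(n):
--         return sum(ord(c) - ord('0') for c in str(n)) if n > 0 else 0
--     s1 = digit_sum(i)
--     s2 = digit_sum(j)
--     return (s1 > s2) - (s1 < s2)
-- ===== Notes on version B (the rewrite author's own statement) =====
-- stated objective: simpler
-- what changed: Digit sums are taken over the decimal string representation (str(n)) instead of arithmetic peeling with %/// loops, and the three-way if/elif/else chain is replaced by the closed-form sign expression (s1 > s2) - (s1 < s2).
import Mathlib
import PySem

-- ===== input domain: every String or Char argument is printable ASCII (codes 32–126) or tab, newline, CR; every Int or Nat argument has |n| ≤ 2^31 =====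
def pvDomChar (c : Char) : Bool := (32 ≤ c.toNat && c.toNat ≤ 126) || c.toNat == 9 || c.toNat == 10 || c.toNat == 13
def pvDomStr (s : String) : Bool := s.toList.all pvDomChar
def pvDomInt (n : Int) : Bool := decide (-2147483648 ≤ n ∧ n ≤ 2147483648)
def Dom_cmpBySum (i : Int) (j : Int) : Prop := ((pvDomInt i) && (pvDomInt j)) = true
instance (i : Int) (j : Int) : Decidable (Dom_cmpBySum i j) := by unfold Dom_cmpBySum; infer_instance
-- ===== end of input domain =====

-- B sums the digits of str(n) instead of peeling digits with %// loops and returns the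
-- three-way comparison as the closed form (s1 > s2) - (s1 < s2); objective: simpler.


-- ===== PORT A =====
-- the `while i > 0: d = i%10; i = i//10; sum += d` loop of A
def cmpBySumLoop (i : Int) (acc : Int) : Int :=
  if i > 0 then
    cmpBySumLoop (PySem.Int.floordiv i 10) (acc + PySem.Int.mod i 10)
  else acc
termination_by i.toNat
decreasing_by
  simp only [PySem.Int.floordiv_eq_ediv_of_pos (by omega : (0:Int) < 10)]
  omega

def cmpBySum (i : Int) (j : Int) : Int :=
  let sum1 := cmpBySumLoop i 0
  let sum2 := cmpBySumLoop j 0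
  if sum1 < sum2 then -1
  else if sum1 = sum2 then 0
  else 1

-- ===== PORT B =====
-- ord(c) - ord('0')
def pvCharVal (c : Char) : Int := (c.toNat : Int) - 48

-- sum(ord(c) - ord('0') for c in str(n)) if n > 0 else 0
def pvDigitSum (n : Int) : Int :=
  if n > 0 then ((PySem.Int.toChars n).map pvCharVal).sum else 0

def cmpBySum_alt (i : Int) (j : Int) : Int :=
  let s1 := pvDigitSum i
  let s2 := pvDigitSum j
  (if s1 > s2 then 1 else 0) - (if s1 < s2 then 1 else 0)

-- ===== PRECONDITION & SPEC =====
def Spec_cmpBySum (i : Int) (j : Int) (out : Int) : Prop := out = cmpBySum_alt i j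
instance (i : Int) (j : Int) (out : Int) : Decidable (Spec_cmpBySum i j out) := by unfold Spec_cmpBySum; infer_instance

-- ===== CLAIM (what is proved, stated in full; the proofs are below) =====
def Claim_equal_cmpBySum : Prop := ∀ (i : Int) (j : Int), Dom_cmpBySum i j → Spec_cmpBySum i j (cmpBySum i j)

-- ===== LEMMAS AND PROOFS =====

-- digit sum of a Nat, the shared reference value
def pvDigSumN (n : Nat) : Int :=
  if n = 0 then 0 else ((n % 10 : Nat) : Int) + pvDigSumN (n / 10)
decreasing_by omega

theorem cmpBySumLoop_eq (i acc : Int) : cmpBySumLoop i acc = acc + pvDigSumN i.toNat := by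
  fun_induction cmpBySumLoop i acc with
  | case1 i acc hpos ih =>
    rw [ih]
    rw [PySem.Int.floordiv_eq_ediv_of_pos (by omega : (0:Int) < 10),
        PySem.Int.mod_eq_emod_of_pos (by omega : (0:Int) < 10)]
    conv_rhs => rw [pvDigSumN]
    rw [if_neg (by omega : ¬ i.toNat = 0)]
    have h1 : (i / 10).toNat = i.toNat / 10 := by omega
    have h2 : i % 10 = ((i.toNat % 10 : Nat) : Int) := by omega
    rw [h1, h2]; ring
  | case2 i acc hpos =>
    rw [pvDigSumN, if_pos (by omega : i.toNat = 0)]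
    ring

theorem charVal_digitChar : ∀ d < 10, pvCharVal (Nat.digitChar d) = (d : Int) := by decide

theorem toDigitsCore_charSum : ∀ (fuel n : Nat) (ds : List Char), n < fuel →
    ((Nat.toDigitsCore 10 fuel n ds).map pvCharVal).sum
      = pvDigSumN n + ((ds.map pvCharVal).sum) := by
  intro fuel
  induction fuel with
  | zero => intro n ds h; omega
  | succ f ih =>
    intro n ds h
    rw [Nat.toDigitsCore]
    by_cases h0 : n / 10 = 0
    · simp only [h0, if_pos]
      simp only [List.map_cons, List.sum_cons]
      rw [charVal_digitChar (n % 10) (by omega)]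
      rw [pvDigSumN]
      by_cases hn : n = 0
      · simp [hn]
      · rw [if_neg hn, h0, pvDigSumN, if_pos rfl]; ring
    · rw [if_neg h0]
      rw [ih (n / 10) _ (by omega)]
      simp only [List.map_cons, List.sum_cons]
      rw [charVal_digitChar (n % 10) (by omega)]
      conv_rhs => rw [pvDigSumN, if_neg (by omega : ¬ n = 0)]
      ring

theorem pvDigitSum_eq (n : Int) : pvDigitSum n = pvDigSumN n.toNat := by
  unfold pvDigitSum
  by_cases h : n > 0
  · rw [if_pos h]
    unfold PySem.Int.toChars
    rw [if_neg (by omega : ¬ n < 0)]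
    unfold Nat.toDigits
    rw [toDigitsCore_charSum (n.toNat + 1) n.toNat [] (by omega)]
    simp
  · rw [if_neg h, pvDigSumN, if_pos (by omega : n.toNat = 0)]

-- ===== VERDICT (by name: the statement is the Claim_ definition above) =====
theorem cmpBySum_spec : Claim_equal_cmpBySum := by
  intro i j _
  unfold Spec_cmpBySum cmpBySum cmpBySum_alt
  rw [cmpBySumLoop_eq, cmpBySumLoop_eq, pvDigitSum_eq, pvDigitSum_eq]
  simp only [zero_add]
  split_ifs <;> omega
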